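-- pv_equiv track=rewrite | github.com/wpchop/general-specific | classify.py | ispunct
-- ===== SOURCE A (Python) =====
-- def ispunct(string):
--   '''Checks if the given string is just punctuation. Returns True or False.'''
--   punct = list(",.?!@#$%^&*~()_+-=[]{};:'\"></\|")
--   result = True
--   for char in string:
--     result = (char in punct)            #If char is punct, result = True
--     if not result:                      #If result is False, return False
--       return result
--   return result
-- ===== SOURCE B (Python) =====
-- PUNCT = ",.?!@#$%^&*~()_+-=[]{};:'\"></\|"
--
-- def ispunct(string):
--   '''Checks if the given string is just punctuation. Returns True or False.'''
--   # The punctuation characters are pairwise distinct, so their occurrence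
--   # counts partition exactly the punctuation positions of the string:
--   # the total equals len(string) iff every character is punctuation.
--   return sum(string.count(c) for c in PUNCT) == len(string)
-- ===== Notes on version B (the rewrite author's own statement) =====
-- stated objective: alternative
-- what changed: Instead of scanning the input character by character with an early-exit membership loop, B loops over the 36 punctuation characters, sums string.count(c) for each, and returns whether the total equals len(string) (valid because the punctuation characters are pairwise distinct, so the counts partition exactly the punctuation positions).
import Mathlib
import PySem

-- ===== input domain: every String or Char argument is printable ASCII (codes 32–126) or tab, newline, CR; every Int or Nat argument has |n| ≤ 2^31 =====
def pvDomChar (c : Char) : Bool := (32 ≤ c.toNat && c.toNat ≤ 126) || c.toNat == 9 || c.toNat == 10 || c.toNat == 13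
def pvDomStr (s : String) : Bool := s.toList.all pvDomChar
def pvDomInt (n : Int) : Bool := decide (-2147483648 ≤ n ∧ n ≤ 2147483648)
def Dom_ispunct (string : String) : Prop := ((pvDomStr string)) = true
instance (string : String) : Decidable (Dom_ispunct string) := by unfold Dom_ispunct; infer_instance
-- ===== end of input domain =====

-- B replaces A's per-character early-exit scan of the input by a loop over the 36
-- punctuation characters, comparing the sum of their occurrence counts with the length
-- (alternative algorithm; same asymptotic cost).

-- ===== PORT A =====
-- the punctuation characters, as A's 'punct = list("…")'
def pvPunct : List Char := ",.?!@#$%^&*~()_+-=[]{};:'\"></\\|".toList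

-- A's loop: 'result' is the running state; 'if not result: return result' is the early exit
def ispunctLoop : List Char → Bool → Bool
  | [], result => result
  | c :: cs, _ =>
    let result := pvPunct.contains c
    if !result then result else ispunctLoop cs result

def ispunct (string : String) : Bool := ispunctLoop string.toList true

-- ===== PORT B =====
-- B's module constant PUNCT
def pvPunctStr : String := ",.?!@#$%^&*~()_+-=[]{};:'\"></\\|"

-- 'sum(string.count(c) for c in PUNCT) == len(string)'
def ispunct_alt (string : String) : Bool :=
  decide ((pvPunctStr.toList.map
      (fun c => (PySem.Str.count string (String.ofList [c]) : Int))).sum = PySem.Str.len string)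

-- ===== PRECONDITION & SPEC =====
def Spec_ispunct (string : String) (out : Bool) : Prop := out = ispunct_alt string
instance (string : String) (out : Bool) : Decidable (Spec_ispunct string out) := by unfold Spec_ispunct; infer_instance

-- ===== CLAIM (what is proved, stated in full; the proofs are below) =====
def Claim_equal_ispunct : Prop := ∀ (string : String), Dom_ispunct string → Spec_ispunct string (ispunct string)

-- ===== LEMMAS AND PROOFS =====
-- A's loop computes 'all characters are punctuation'
theorem ispunctLoop_eq_all (cs : List Char) (b : Bool) :
    ispunctLoop cs b = if cs = [] then b else cs.all (fun c => pvPunct.contains c) := by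
  induction cs generalizing b with
  | nil => simp [ispunctLoop]
  | cons c cs ih =>
    simp only [ispunctLoop, ih]
    by_cases h : pvPunct.contains c = true <;> cases cs <;> simp_all

-- PySem.Chars.count with a single-character pattern is List.count
theorem countGo_singleton (c : Char) : ∀ (fuel : Nat) (l : List Char) (acc : Nat),
    l.length ≤ fuel → PySem.Chars.count.go [c] fuel l acc = acc + l.count c := by
  intro fuel
  induction fuel with
  | zero =>
    intro l acc h
    cases l with
    | nil => simp [PySem.Chars.count.go]
    | cons x t => simp at h
  | succ n ih =>
    intro l acc h
    cases l with
    | nil => simp [PySem.Chars.count.go]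
    | cons x t =>
      simp only [PySem.Chars.count.go, List.isPrefixOf, Bool.and_true]
      by_cases hx : c == x
      · simp only [hx, if_true, List.length_cons, List.length_nil, List.drop_succ_cons,
          List.drop_zero]
        rw [ih t (acc + 1) (by simpa using Nat.le_of_succ_le_succ h)]
        have hcx : c = x := by simpa using hx
        have : (x :: t).count c = t.count c + 1 := by simp [hcx]
        omega
      · simp only [hx, Bool.false_eq_true, if_false]
        rw [ih t acc (by simpa using Nat.le_of_succ_le_succ h)]
        have hcx : ¬ c = x := by simpa using hx
        have hxc : ¬ x = c := fun h => hcx h.symm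
        have : (x :: t).count c = t.count c := by simp [hxc]
        omega

theorem count_singleton (s : List Char) (c : Char) :
    PySem.Chars.count s [c] = s.count c := by
  simp only [PySem.Chars.count, List.isEmpty_cons, if_false, Bool.false_eq_true]
  simpa using countGo_singleton c s.length s 0 (le_refl _)

-- a 0/1 indicator summed over a list is the count of the indicated element
theorem sum_map_indicator (x : Char) (P : List Char) :
    (P.map (fun c => if c == x then (1 : Int) else 0)).sum = (P.count x : Int) := by
  induction P with
  | nil => simp
  | cons p ps ihp =>
    simp only [List.map_cons, List.sum_cons, ihp, List.count_cons]
    by_cases hpx : p = x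
    · subst hpx; simp; ring
    · have hxp : ¬ x = p := fun h => hpx h.symm
      simp [hpx]

-- the per-character counts of a duplicate-free alphabet sum to the countP of membership
theorem sum_counts_eq_countP (P : List Char) (hP : P.Nodup) (s : List Char) :
    (P.map (fun c => (s.count c : Int))).sum = (s.countP (fun x => P.contains x) : Int) := by
  induction s with
  | nil => simp
  | cons x t ih =>
    have h1 : (P.map (fun c => ((x :: t).count c : Int))).sum
        = (P.map (fun c => (t.count c : Int))).sum
          + (P.map (fun c => if c == x then (1 : Int) else 0)).sum := by
      rw [show (fun c => (((x :: t).count c : Nat) : Int))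
            = (fun c => ((t.count c : Nat) : Int) + (if c == x then 1 else 0)) from
          funext fun c => by
            by_cases hcx : c = x
            · simp [hcx]
            · have hxc : ¬ x = c := fun h => hcx h.symm
              simp [hcx, hxc]]
      rw [List.sum_map_add]
    have h3 : (P.count x : Int) = if P.contains x then 1 else 0 := by
      by_cases hm : x ∈ P
      · simp [List.count_eq_one_of_mem hP hm, hm]
      · simp [List.count_eq_zero.mpr hm, hm]
    rw [h1, ih, sum_map_indicator, h3, List.countP_cons]
    by_cases hm : P.contains x = true <;> simp

-- B computes 'all characters are punctuation' as well
theorem ispunct_alt_eq_all (s : String) :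
    ispunct_alt s = s.toList.all (fun c => pvPunct.contains c) := by
  have hP : pvPunctStr.toList = pvPunct := rfl
  have hnd : pvPunct.Nodup := by decide
  unfold ispunct_alt
  have hc : ∀ c : Char, (PySem.Str.count s (String.ofList [c]) : Int) = (s.toList.count c : Int) := by
    intro c
    rw [PySem.Str.count_eq, String.toList_ofList, count_singleton]
  have hsum : (pvPunctStr.toList.map
      (fun c => (PySem.Str.count s (String.ofList [c]) : Int))).sum
      = (s.toList.countP (fun x => pvPunct.contains x) : Int) := by
    rw [hP]
    calc (pvPunct.map (fun c => (PySem.Str.count s (String.ofList [c]) : Int))).sum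
        = (pvPunct.map (fun c => (s.toList.count c : Int))).sum := by
          exact congrArg List.sum (List.map_congr_left (fun c _ => hc c))
      _ = _ := sum_counts_eq_countP pvPunct hnd s.toList
  rw [hsum, PySem.Str.len_eq]
  by_cases hall : ∀ c ∈ s.toList, pvPunct.contains c = true
  · have h := List.countP_eq_length.mpr hall
    have hT : s.toList.all (fun c => pvPunct.contains c) = true := List.all_eq_true.mpr hall
    rw [hT, decide_eq_true_eq]
    exact_mod_cast h
  · have hne : s.toList.countP (fun x => pvPunct.contains x) ≠ s.toList.length :=
      fun heq => hall (List.countP_eq_length.mp heq)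
    have hF : s.toList.all (fun c => pvPunct.contains c) = false := by
      simpa [List.all_eq_true] using hall
    rw [hF, decide_eq_false]
    exact_mod_cast hne

-- ===== VERDICT (by name: the statement is the Claim_ definition above) =====
theorem ispunct_spec : Claim_equal_ispunct := by
  intro s _
  unfold Spec_ispunct ispunct
  rw [ispunctLoop_eq_all, ispunct_alt_eq_all]
  cases h : s.toList <;> simp
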